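-- pv_equiv track=rewrite | github.com/BrunelJacques/OpenRef | xpy/outils/xformat.py | LettreSuivante
-- ===== SOURCE A (Python) =====
-- def LettreSuivante(lettre=''):
--         # incrémentation d'un lettrage
--         if not isinstance(lettre, str): lettre = 'A'
--         if lettre == '': lettre = 'A'
--         lastcar = lettre[-1]
--         precars = lettre[:-1]
--         if ord(lastcar) in (90, 122):
--             if len(precars) == 0:
--                 precars = chr(ord(lastcar) - 25)
--             else:
--                 precars = LettreSuivante(precars)
--             new = precars + chr(ord(lastcar) - 25)
--         else:
--             new = precars + chr(ord(lastcar) + 1)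
--         return new
-- ===== SOURCE B (Python) =====
-- def LettreSuivante(lettre=''):
--     # iterative version: reset the trailing run of alphabet-final chars, then bump or overflow
--     if not isinstance(lettre, str) or lettre == '':
--         lettre = 'A'
--     rev = list(reversed(lettre))
--     out = []
--     i = 0
--     while i < len(rev) and rev[i] in ('Z', 'z'):
--         out.append(chr(ord(rev[i]) - 25))
--         i += 1
--     if i < len(rev):
--         out.append(chr(ord(rev[i]) + 1))
--         out.extend(rev[i + 1:])
--     else:
--         out.append(out[-1])
--     return ''.join(reversed(out))
-- ===== Notes on version B (the rewrite author's own statement) =====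
-- stated objective: alternative
-- what changed: Replaces A's recursion on the string prefix with a single iterative pass over the reversed characters that resets the trailing run of alphabet-final characters, then bumps the next character or duplicates the overflow character.
import Mathlib
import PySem

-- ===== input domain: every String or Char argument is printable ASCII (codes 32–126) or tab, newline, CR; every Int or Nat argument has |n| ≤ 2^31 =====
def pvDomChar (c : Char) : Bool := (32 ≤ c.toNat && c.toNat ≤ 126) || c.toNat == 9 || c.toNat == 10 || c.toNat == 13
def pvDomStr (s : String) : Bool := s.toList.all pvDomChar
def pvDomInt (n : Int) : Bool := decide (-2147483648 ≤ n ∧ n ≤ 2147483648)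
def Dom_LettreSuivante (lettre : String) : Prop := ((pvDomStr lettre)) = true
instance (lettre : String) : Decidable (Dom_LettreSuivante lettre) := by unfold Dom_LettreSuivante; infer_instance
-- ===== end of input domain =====

-- B replaces A's prefix recursion by one iterative pass over the reversed characters (objective: alternative, same cost class in practice).

-- ===== PORT A =====
-- literal transliteration of A's recursive code on the char list:
-- normalize '' to "A", split last char / prefix, recurse on the prefix when the last char is alphabet-final.
def LettreSuivanteCore (l : List Char) : List Char :=
  let lettre := if l.isEmpty then ['A'] else l
  let lastcar := lettre.getLastD ' '
  let precars := lettre.dropLast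
  if lastcar.toNat = 90 ∨ lastcar.toNat = 122 then
    let precars2 := if precars.isEmpty then [Char.ofNat (lastcar.toNat - 25)]
                    else LettreSuivanteCore precars
    precars2 ++ [Char.ofNat (lastcar.toNat - 25)]
  else
    precars ++ [Char.ofNat (lastcar.toNat + 1)]
termination_by l.length
decreasing_by
  rename_i h1 h2
  cases l with
  | nil => exact absurd rfl h2
  | cons a t => simp_all [List.length_dropLast]

def LettreSuivante (lettre : String) : String :=
  String.mk (LettreSuivanteCore lettre.toList)

-- ===== PORT B =====
-- literal transliteration of Source B's while loop: walk the reversed chars,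
-- appending the reset of each trailing alphabet-final char; then bump the next char and copy
-- the rest, or (carry ran off the front) duplicate the last reset char.
def LettreSuivanteAltGo : List Char → List Char → List Char
  | [], out => out ++ [out.getLastD 'A']
  | c :: rest, out =>
      if c = 'Z' ∨ c = 'z' then
        LettreSuivanteAltGo rest (out ++ [Char.ofNat (c.toNat - 25)])
      else
        out ++ [Char.ofNat (c.toNat + 1)] ++ rest

def LettreSuivante_alt (lettre : String) : String :=
  let l := if lettre.toList.isEmpty then ['A'] else lettre.toList
  String.mk ((LettreSuivanteAltGo l.reverse []).reverse)

-- ===== PRECONDITION & SPEC =====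
def Spec_LettreSuivante (lettre : String) (out : String) : Prop := out = LettreSuivante_alt lettre
instance (lettre : String) (out : String) : Decidable (Spec_LettreSuivante lettre out) := by unfold Spec_LettreSuivante; infer_instance

-- ===== CLAIM (what is proved, stated in full; the proofs are below) =====
def Claim_equal_LettreSuivante : Prop := ∀ (lettre : String), Dom_LettreSuivante lettre → Spec_LettreSuivante lettre (LettreSuivante lettre)

-- ===== LEMMAS AND PROOFS =====

-- the suffix LettreSuivanteAltGo produces after a nonempty accumulator whose last char is d
def pvTailGo : List Char → Char → List Char
  | [], d => [d]
  | c :: rest, d =>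
      if c = 'Z' ∨ c = 'z' then
        Char.ofNat (c.toNat - 25) :: pvTailGo rest (Char.ofNat (c.toNat - 25))
      else
        Char.ofNat (c.toNat + 1) :: rest

lemma char_eq_iff_toNat (c : Char) :
    (c = 'Z' ∨ c = 'z') ↔ (c.toNat = 90 ∨ c.toNat = 122) := by
  constructor
  · rintro (rfl | rfl) <;> decide
  · rintro (h | h) <;> [left; right] <;>
      · have := Char.ofNat_toNat c; rw [h] at this; exact this.symm

lemma altGo_acc (r : List Char) :
    ∀ (out : List Char) (x : Char),
      LettreSuivanteAltGo r (out ++ [x]) = (out ++ [x]) ++ pvTailGo r x := by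
  induction r with
  | nil => intro out x; simp [LettreSuivanteAltGo, pvTailGo]
  | cons c rest ih =>
      intro out x
      by_cases h : c = 'Z' ∨ c = 'z'
      · simp only [LettreSuivanteAltGo, pvTailGo, if_pos h]
        rw [show out ++ [x] ++ [Char.ofNat (c.toNat - 25)]
              = (out ++ [x]) ++ [Char.ofNat (c.toNat - 25)] from rfl, ih]
        simp
      · simp [LettreSuivanteAltGo, pvTailGo, if_neg h]

lemma core_concat (l : List Char) (c : Char) :
    LettreSuivanteCore (l ++ [c]) =
      if c.toNat = 90 ∨ c.toNat = 122 then
        (if l.isEmpty then [Char.ofNat (c.toNat - 25)] else LettreSuivanteCore l)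
          ++ [Char.ofNat (c.toNat - 25)]
      else l ++ [Char.ofNat (c.toNat + 1)] := by
  rw [LettreSuivanteCore]
  simp

lemma tailGo_eq_core (r : List Char) :
    ∀ d : Char, r ≠ [] → (pvTailGo r d).reverse = LettreSuivanteCore r.reverse := by
  induction r with
  | nil => intro _ h; exact absurd rfl h
  | cons c rest ih =>
      intro d _
      have hrev : (c :: rest).reverse = rest.reverse ++ [c] := by simp
      rw [hrev, core_concat]
      by_cases h : c = 'Z' ∨ c = 'z'
      · rw [if_pos ((char_eq_iff_toNat c).mp h)]
        simp only [pvTailGo, if_pos h, List.reverse_cons]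
        cases rest with
        | nil => simp [pvTailGo]
        | cons a t =>
            rw [ih _ (by simp)]
            simp
      · rw [if_neg (fun hn => h ((char_eq_iff_toNat c).mpr hn))]
        simp [pvTailGo, if_neg h]

lemma main_eq (l : List Char) (hl : l ≠ []) :
    LettreSuivanteCore l = (LettreSuivanteAltGo l.reverse []).reverse := by
  obtain ⟨c, r, hr⟩ : ∃ c r, l.reverse = c :: r := by
    cases h : l.reverse with
    | nil => exact absurd (by simpa using congrArg List.reverse h) hl
    | cons a t => exact ⟨a, t, rfl⟩
  have hl' : l = r.reverse ++ [c] := by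
    have := congrArg List.reverse hr; simpa using this
  rw [hr, hl', core_concat]
  by_cases h : c = 'Z' ∨ c = 'z'
  · rw [if_pos ((char_eq_iff_toNat c).mp h)]
    simp only [LettreSuivanteAltGo, if_pos h, List.nil_append]
    rw [show [Char.ofNat (c.toNat - 25)] = [] ++ [Char.ofNat (c.toNat - 25)] from rfl,
        altGo_acc]
    cases r with
    | nil => simp [pvTailGo]
    | cons a t =>
        rw [show ((([] : List Char) ++ [Char.ofNat (c.toNat - 25)]) ++
              pvTailGo (a :: t) (Char.ofNat (c.toNat - 25))).reverse
            = (pvTailGo (a :: t) (Char.ofNat (c.toNat - 25))).reverse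
              ++ [Char.ofNat (c.toNat - 25)] by simp]
        rw [tailGo_eq_core _ _ (by simp)]
        simp
  · rw [if_neg (fun hn => h ((char_eq_iff_toNat c).mpr hn))]
    simp [LettreSuivanteAltGo, if_neg h]

-- ===== VERDICT (by name: the statement is the Claim_ definition above) =====
theorem LettreSuivante_spec : Claim_equal_LettreSuivante := by
  intro lettre _
  unfold Spec_LettreSuivante LettreSuivante LettreSuivante_alt
  cases h : lettre.toList with
  | nil =>
      simp only [List.isEmpty_nil, if_pos]
      rw [LettreSuivanteCore]
      simp [LettreSuivanteAltGo]
  | cons a t =>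
      simp only [List.isEmpty_cons]
      rw [main_eq (a :: t) (by simp)]
      simp
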